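-- pv_equiv track=rewrite | github.com/FDA/AssignMALDI | common.py | subtractDict_neg
-- ===== SOURCE A (Python) =====
-- def subtractDict_neg(d1,d2):
-- 	# subtracts d2 from d1.  Returns negative values if something is in d2 but not d1
-- 	td={};kt=d1.copy()
--
-- 	for key,val in d2.items():
-- 		if key in d1:
-- 			kt.pop(key,None)
-- 			diff = d1[key]-val
-- 			if diff!=0:td[key]=diff
-- 		else:  #in d2 but not d1
-- 			diff = 0-val
-- 			if diff!=0:td[key]=diff
-- 	for key,val in kt.items():  #check to see if something is in d1 but not d2
-- 		if key not in td and val!=0: td[key]=val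
--
-- 	return td
-- ===== SOURCE B (Python) =====
-- def subtractDict_neg(d1, d2):
--     # One pass over an explicit key sequence (d2's keys, then d1-only keys),
--     # using .get defaults instead of A's copy/pop bookkeeping and branch pair.
--     keys = list(d2) + [k for k in d1 if k not in d2]
--     td = {}
--     for k in keys:
--         diff = d1.get(k, 0) - d2.get(k, 0)
--         if diff != 0:
--             td[k] = diff
--     return td
-- ===== Notes on version B (the rewrite author's own statement) =====
-- stated objective: simpler
-- what changed: B drops A's mutable copy kt and its pop/leftover-scan bookkeeping and the two in/else branches: it builds the ordered key sequence (d2's keys, then d1-only keys) once and fills the result in a single uniform pass with diff = d1.get(k,0) - d2.get(k,0), kept when nonzero.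
import Mathlib
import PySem

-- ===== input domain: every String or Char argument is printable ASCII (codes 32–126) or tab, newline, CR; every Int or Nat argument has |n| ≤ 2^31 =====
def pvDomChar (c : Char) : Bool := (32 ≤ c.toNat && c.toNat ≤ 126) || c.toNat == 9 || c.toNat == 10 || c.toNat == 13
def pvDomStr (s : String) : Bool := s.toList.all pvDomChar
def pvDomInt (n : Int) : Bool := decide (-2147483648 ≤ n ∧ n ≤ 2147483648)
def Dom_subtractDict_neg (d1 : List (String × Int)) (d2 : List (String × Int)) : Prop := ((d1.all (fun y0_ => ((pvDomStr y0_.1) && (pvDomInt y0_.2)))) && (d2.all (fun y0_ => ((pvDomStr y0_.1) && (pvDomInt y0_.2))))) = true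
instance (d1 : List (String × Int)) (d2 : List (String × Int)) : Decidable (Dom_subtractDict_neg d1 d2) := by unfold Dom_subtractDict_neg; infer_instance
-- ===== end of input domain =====

-- B replaces A's copy/pop bookkeeping and branch pair by one uniform pass over an explicit
-- ordered key sequence with .get defaults — simpler, same cost.


-- ===== PORT A =====
-- Literal port of A. The dict arguments are modelled as their items lists (insertion order);
-- d1.copy() is the dict itself, kt.pop(key, None) is erase, d1[key] under 'key in d1' is getD.
def subtractDict_neg (d1 : List (String × Int)) (d2 : List (String × Int)) : List (String × Int) :=
  let D1 : PySem.Dict String Int := PySem.Dict.mk d1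
  let tdkt :=
    (PySem.Dict.mk d2).items.foldl
      (fun (s : PySem.Dict String Int × PySem.Dict String Int) kv =>
        if D1.contains kv.1 then
          let kt := s.2.erase kv.1
          let diff := D1.getD kv.1 0 - kv.2
          (if diff ≠ 0 then s.1.insert kv.1 diff else s.1, kt)
        else
          let diff := 0 - kv.2
          (if diff ≠ 0 then s.1.insert kv.1 diff else s.1, s.2))
      (PySem.Dict.empty, D1)
  let td :=
    tdkt.2.items.foldl
      (fun td kv => if ¬ td.contains kv.1 ∧ kv.2 ≠ 0 then td.insert kv.1 kv.2 else td)
      tdkt.1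
  td.items

-- ===== PORT B =====
-- Port of Source B: explicit key sequence, then one uniform pass with getD defaults.
def subtractDict_neg_alt (d1 : List (String × Int)) (d2 : List (String × Int)) : List (String × Int) :=
  let D1 : PySem.Dict String Int := PySem.Dict.mk d1
  let D2 : PySem.Dict String Int := PySem.Dict.mk d2
  let keys := D2.keys ++ D1.keys.filter (fun k => !D2.contains k)
  let td :=
    keys.foldl
      (fun td k =>
        let diff := D1.getD k 0 - D2.getD k 0
        if diff ≠ 0 then td.insert k diff else td)
      (PySem.Dict.empty : PySem.Dict String Int)
  td.items

-- ===== PRECONDITION & SPEC =====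
-- The arguments model Python dicts, whose keys are necessarily distinct; Pre_ states that
-- invariant (an association list with duplicate keys corresponds to no input A can receive).
def Pre_subtractDict_neg (d1 : List (String × Int)) (d2 : List (String × Int)) : Prop :=
  (d1.map Prod.fst).Nodup ∧ (d2.map Prod.fst).Nodup
instance (d1 : List (String × Int)) (d2 : List (String × Int)) : Decidable (Pre_subtractDict_neg d1 d2) := by unfold Pre_subtractDict_neg; infer_instance

def pvWitness_subtractDict_neg : (List (String × Int)) × (List (String × Int)) :=
  ([("a", 3), ("b", 2)], [("b", 2), ("c", 1)])

def Spec_subtractDict_neg (d1 : List (String × Int)) (d2 : List (String × Int)) (out : List (String × Int)) : Prop := out = subtractDict_neg_alt d1 d2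
instance (d1 : List (String × Int)) (d2 : List (String × Int)) (out : List (String × Int)) : Decidable (Spec_subtractDict_neg d1 d2 out) := by unfold Spec_subtractDict_neg; infer_instance

-- ===== CLAIM (what is proved, stated in full; the proofs are below) =====
def Claim_equal_subtractDict_neg : Prop := ∀ (d1 : List (String × Int)) (d2 : List (String × Int)), Dom_subtractDict_neg d1 d2 → Pre_subtractDict_neg d1 d2 → Spec_subtractDict_neg d1 d2 (subtractDict_neg d1 d2)

-- ===== LEMMAS AND PROOFS =====

theorem pv_foldl_erase_filter (c : String × Int → Bool) (L : List (String × Int))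
    (d : PySem.Dict String Int) :
    (L.foldl (fun kt kv => if c kv then kt.erase kv.1 else kt) d).items
      = d.items.filter (fun q => L.all (fun p => !(c p && p.1 == q.1))) := by
  induction L generalizing d with
  | nil => simp
  | cons p L ih =>
    simp only [List.foldl_cons, List.all_cons]
    by_cases h : c p
    · rw [if_pos h, ih]
      simp only [PySem.Dict.erase, List.filter_filter, h, Bool.true_and]
      apply List.filter_congr; intro q _
      by_cases hpq : p.1 = q.1
      · simp [hpq, Bool.and_comm]
      · simp [beq_false_of_ne hpq, beq_false_of_ne (Ne.symm hpq)]
    · rw [if_neg h, ih]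
      apply List.filter_congr; intro q _
      simp [h]

theorem pv_contains_foldl_ins (g : String × Int → Int) (L : List (String × Int))
    (td : PySem.Dict String Int) (k : String)
    (h : (L.foldl (fun td kv => if g kv ≠ 0 then td.insert kv.1 (g kv) else td) td).contains k = true) :
    td.contains k = true ∨ k ∈ L.map Prod.fst := by
  induction L generalizing td with
  | nil => simpa using h
  | cons p L ih =>
    simp only [List.foldl_cons] at h
    rcases ih _ h with h' | h'
    · by_cases hz : g p ≠ 0
      · rw [if_pos hz, PySem.Dict.contains_insert] at h'
        rcases Bool.or_eq_true_iff.mp h' with h'' | h''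
        · exact Or.inr (by simp [eq_of_beq h''])
        · exact Or.inl h''
      · rw [if_neg hz] at h'; exact Or.inl h'
    · exact Or.inr (by simp [h'] )

theorem pv_loop2_eq (L : List (String × Int)) (td : PySem.Dict String Int)
    (h : ∀ p ∈ L, td.contains p.1 = false) (hnd : (L.map Prod.fst).Nodup) :
    L.foldl (fun td kv => if ¬ td.contains kv.1 ∧ kv.2 ≠ 0 then td.insert kv.1 kv.2 else td) td
      = L.foldl (fun td kv => if kv.2 ≠ 0 then td.insert kv.1 kv.2 else td) td := by
  induction L generalizing td with
  | nil => rfl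
  | cons p L ih =>
    simp only [List.map_cons, List.nodup_cons] at hnd
    have hp : td.contains p.1 = false := h p (by simp)
    rw [List.foldl_cons, List.foldl_cons]
    have hrest : ∀ q ∈ L, (if p.2 ≠ 0 then td.insert p.1 p.2 else td).contains q.1 = false := by
      intro q hq
      have hqp : ¬ q.1 = p.1 := by
        intro hc; exact hnd.1 (hc ▸ List.mem_map_of_mem hq)
      split
      · rw [PySem.Dict.contains_insert]
        simp [hqp, h q (List.mem_cons_of_mem _ hq)]
      · exact h q (List.mem_cons_of_mem _ hq)
    have e : (¬ td.contains p.1 = true ∧ p.2 ≠ 0) ↔ (p.2 ≠ 0) := by simp [hp]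
    rw [if_congr e rfl rfl]
    exact ih _ hrest hnd.2

theorem pv_loop1 (D1 : PySem.Dict String Int) (L : List (String × Int))
    (td kt : PySem.Dict String Int) :
    L.foldl (fun (s : PySem.Dict String Int × PySem.Dict String Int) kv =>
        if D1.contains kv.1 then
          let kt := s.2.erase kv.1
          let diff := D1.getD kv.1 0 - kv.2
          (if diff ≠ 0 then s.1.insert kv.1 diff else s.1, kt)
        else
          let diff := 0 - kv.2
          (if diff ≠ 0 then s.1.insert kv.1 diff else s.1, s.2)) (td, kt)
      = (L.foldl (fun td kv =>
            if D1.contains kv.1 then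
              (if D1.getD kv.1 0 - kv.2 ≠ 0 then td.insert kv.1 (D1.getD kv.1 0 - kv.2) else td)
            else
              (if 0 - kv.2 ≠ 0 then td.insert kv.1 (0 - kv.2) else td)) td,
         L.foldl (fun kt kv => if D1.contains kv.1 then kt.erase kv.1 else kt) kt) := by
  induction L generalizing td kt with
  | nil => rfl
  | cons p L ih =>
    by_cases h : D1.contains p.1
    · simp only [List.foldl_cons, h, ite_true]
      exact ih _ _
    · simp only [List.foldl_cons, h, ite_false, Bool.false_eq_true]
      exact ih _ _

theorem pv_filter_map_fst (l : List (String × Int)) (p : String → Bool) :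
    (l.map Prod.fst).filter p = (l.filter (fun q => p q.1)).map Prod.fst := by
  induction l with
  | nil => rfl
  | cons a l ih => by_cases h : p a.1 <;> simp [h, ih]

theorem pv_main (d1 d2 : List (String × Int)) (hn1 : (d1.map Prod.fst).Nodup)
    (hn2 : (d2.map Prod.fst).Nodup) : subtractDict_neg d1 d2 = subtractDict_neg_alt d1 d2 := by
  have hkeys1 : (PySem.Dict.mk d1).keys.Nodup := hn1
  have hkeys2 : (PySem.Dict.mk d2).keys.Nodup := hn2
  set F : PySem.Dict String Int → (String × Int) → PySem.Dict String Int :=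
    fun td kv => if (PySem.Dict.mk d1).getD kv.1 0 - kv.2 ≠ 0
                 then td.insert kv.1 ((PySem.Dict.mk d1).getD kv.1 0 - kv.2) else td with hF
  set ktItems : List (String × Int) :=
    d1.filter (fun q => !(PySem.Dict.mk d2).contains q.1) with hktI
  have hfresh : ∀ p ∈ ktItems, (List.foldl F PySem.Dict.empty d2).contains p.1 = false := by
    intro p hp
    by_contra hcon
    have hcc : (List.foldl F PySem.Dict.empty d2).contains p.1 = true := by
      revert hcon; cases (List.foldl F PySem.Dict.empty d2).contains p.1 <;> simp
    rw [hF] at hcc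
    rcases pv_contains_foldl_ins (fun kv => (PySem.Dict.mk d1).getD kv.1 0 - kv.2) d2 _ _ hcc with h0 | hm
    · rw [PySem.Dict.contains_empty] at h0; cases h0
    · obtain ⟨r, hr, hrq⟩ := List.mem_map.mp hm
      rw [hktI] at hp
      have hmem := List.mem_filter.mp hp
      have : (PySem.Dict.mk d2).contains p.1 = true := by
        simp only [PySem.Dict.contains, List.any_eq_true]
        exact ⟨r, hr, by simp [hrq]⟩
      simp [this] at hmem
  have hnd : (ktItems.map Prod.fst).Nodup := by
    rw [hktI]
    exact List.Nodup.sublist (List.Sublist.map Prod.fst List.filter_sublist) hn1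
  have hA : subtractDict_neg d1 d2 =
      (ktItems.foldl (fun td kv => if kv.2 ≠ 0 then td.insert kv.1 kv.2 else td)
        (d2.foldl F PySem.Dict.empty)).items := by
    simp only [subtractDict_neg]
    rw [pv_loop1]
    have h_td1 : List.foldl (fun td kv =>
          if (PySem.Dict.mk d1).contains kv.1 then
            (if (PySem.Dict.mk d1).getD kv.1 0 - kv.2 ≠ 0 then td.insert kv.1 ((PySem.Dict.mk d1).getD kv.1 0 - kv.2) else td)
          else
            (if 0 - kv.2 ≠ 0 then td.insert kv.1 (0 - kv.2) else td))
        PySem.Dict.empty d2 = List.foldl F PySem.Dict.empty d2 := by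
      apply PySem.List.foldl_congr_mem
      intro acc kv hkv
      by_cases h : (PySem.Dict.mk d1).contains kv.1
      · rw [if_pos h, hF]
      · rw [if_neg h, hF]
        beta_reduce
        rw [PySem.Dict.getD_of_not_contains _ 0 (Bool.eq_false_iff.mpr h)]
    have h_kt : (List.foldl (fun kt kv =>
          if (PySem.Dict.mk d1).contains kv.1 then kt.erase kv.1 else kt) (PySem.Dict.mk d1) d2).items
        = ktItems := by
      rw [pv_foldl_erase_filter (fun kv => (PySem.Dict.mk d1).contains kv.1), hktI]
      apply List.filter_congr
      intro q hq
      have hc : (PySem.Dict.mk d1).contains q.1 = true := by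
        simp only [PySem.Dict.contains, List.any_eq_true]
        exact ⟨q, hq, by simp⟩
      cases hb : (PySem.Dict.mk d2).contains q.1
      · have hall : ∀ p ∈ d2, (p.1 == q.1) = false := by
          intro p hp
          by_contra hne
          have hpq : (p.1 == q.1) = true := by
            revert hne; cases (p.1 == q.1) <;> simp
          have : (PySem.Dict.mk d2).contains q.1 = true := by
            simp only [PySem.Dict.contains, List.any_eq_true]
            exact ⟨p, hp, hpq⟩
          rw [this] at hb; cases hb
        simp only [Bool.not_false]
        rw [List.all_eq_true]
        intro p hp
        simp [hall p hp]
      · obtain ⟨p, hp, hpq⟩ : ∃ p ∈ d2, (p.1 == q.1) = true := by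
          simpa only [PySem.Dict.contains, List.any_eq_true] using hb
        have hq1 : p.1 = q.1 := eq_of_beq hpq
        simp only [Bool.not_true]
        rw [List.all_eq_false]
        refine ⟨p, hp, ?_⟩
        simp [hpq, hq1 ▸ hc]
    rw [h_td1, h_kt]
    rw [pv_loop2_eq ktItems _ hfresh hnd]
  have hB : subtractDict_neg_alt d1 d2 =
      (ktItems.foldl (fun td kv => if kv.2 ≠ 0 then td.insert kv.1 kv.2 else td)
        (d2.foldl F PySem.Dict.empty)).items := by
    simp only [subtractDict_neg_alt]
    rw [List.foldl_append]
    have hseg1 : List.foldl (fun td k =>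
          if (PySem.Dict.mk d1).getD k 0 - (PySem.Dict.mk d2).getD k 0 ≠ 0
          then td.insert k ((PySem.Dict.mk d1).getD k 0 - (PySem.Dict.mk d2).getD k 0) else td)
        PySem.Dict.empty (PySem.Dict.mk d2).keys = List.foldl F PySem.Dict.empty d2 := by
      rw [show (PySem.Dict.mk d2).keys = d2.map Prod.fst from rfl, List.foldl_map]
      apply PySem.List.foldl_congr_mem
      intro acc p hp
      rw [PySem.Dict.getD_of_mem_items _ (by simpa using hp) hkeys2 0, hF]
    have hseg2list : ((PySem.Dict.mk d1).keys.filter (fun k => !(PySem.Dict.mk d2).contains k))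
        = ktItems.map Prod.fst := by
      rw [show (PySem.Dict.mk d1).keys = d1.map Prod.fst from rfl, hktI, pv_filter_map_fst]
    rw [hseg1, hseg2list, List.foldl_map]
    refine congrArg PySem.Dict.items ?_
    apply PySem.List.foldl_congr_mem
    intro acc q hq
    beta_reduce
    rw [hktI] at hq
    have hmem := List.mem_filter.mp hq
    have hnc : (PySem.Dict.mk d2).contains q.1 = false := by
      revert hmem; cases (PySem.Dict.mk d2).contains q.1 <;> simp
    rw [PySem.Dict.getD_of_not_contains _ 0 hnc,
        PySem.Dict.getD_of_mem_items _ (by simpa using hmem.1) hkeys1 0, sub_zero]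
  rw [hA, hB]


-- ===== VERDICT (by name: the statement is the Claim_ definition above) =====
theorem subtractDict_neg_spec : Claim_equal_subtractDict_neg := by
  intro d1 d2 _hdom hpre
  unfold Spec_subtractDict_neg
  exact pv_main d1 d2 hpre.1 hpre.2
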